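-- pv_equiv track=rewrite | github.com/nicklogin/REALEC-English-Test-Maker | realec_grammar_exercises.py | find_embeddings
-- ===== SOURCE A (Python) =====
-- def find_embeddings(indices):
--     indices.sort(key=lambda x: (x[0],-x[1]))
--     embedded = []
--     overlap = []
--     for i in range(1,len(indices)):
--         find_emb = [x for x in indices if (x[0] <= indices[i][0] and x[1] > indices[i][1]) or \
--                                           (x[0] < indices[i][0] and x[1] >= indices[i][1])]
--         if find_emb:
--             embedded.append(indices[i])
--         elif indices[i][0] < indices[i-1][1]:
--             overlap.append(indices[i])
--     return embedded, overlap
-- ===== SOURCE B (Python) =====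
-- # B: sort once, then a single linear pass keeping two running maxima of interval
-- # endpoints (one over all processed intervals, one over intervals with a strictly
-- # smaller start), instead of A's O(n^2) rescan of the whole list per element.
-- # Like A, it sorts `indices` in place (same observable mutation).
-- def find_embeddings(indices):
--     indices.sort(key=lambda x: (x[0], -x[1]))
--     embedded = []
--     overlap = []
--     if indices:
--         all_max = indices[0][1]      # max end over processed prefix
--         strict_max = None            # max end over processed with start < current group start
--         group_start = indices[0][0]  # start of the last processed interval
--         prev_end = indices[0][1]     # end of the last processed interval
--         for cur in indices[1:]:
--             if cur[0] != group_start: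
--                 strict_max = all_max
--                 group_start = cur[0]
--             if all_max > cur[1] or (strict_max is not None and strict_max >= cur[1]):
--                 embedded.append(cur)
--             elif cur[0] < prev_end:
--                 overlap.append(cur)
--             if cur[1] > all_max:
--                 all_max = cur[1]
--             prev_end = cur[1]
--     return embedded, overlap
-- ===== Notes on version B (the rewrite author's own statement) =====
-- stated objective: faster
-- what changed: A rescans the whole sorted list for a containing interval once per element (O(n^2)); B sorts once and does a single linear pass keeping two running maxima of endpoints (over all processed intervals, and over those with strictly smaller start), which decide containment per element in O(1).
import Mathlib
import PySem

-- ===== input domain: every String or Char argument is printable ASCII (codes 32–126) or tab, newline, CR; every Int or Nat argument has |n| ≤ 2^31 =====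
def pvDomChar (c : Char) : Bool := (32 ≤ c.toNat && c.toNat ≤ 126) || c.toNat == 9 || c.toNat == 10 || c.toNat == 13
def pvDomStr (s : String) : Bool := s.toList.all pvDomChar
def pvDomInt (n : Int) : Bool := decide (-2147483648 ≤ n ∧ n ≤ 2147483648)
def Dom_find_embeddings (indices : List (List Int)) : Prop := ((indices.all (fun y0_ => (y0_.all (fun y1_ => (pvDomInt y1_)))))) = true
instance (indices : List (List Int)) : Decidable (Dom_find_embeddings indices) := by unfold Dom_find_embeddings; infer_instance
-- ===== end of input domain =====

-- B replaces A's per-element rescan of the whole sorted list by one linear pass with two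
-- running maxima of endpoints; the equivalence proved is about the RETURN value
-- (Python A and B both sort `indices` in place, the same observable mutation).

-- shared index helpers: x[0], x[1] and the Python sort key (x[0], -x[1]) (tuple order = lex)
def pvStart (x : List Int) : Int := PySem.List.pyGetD x 0 0
def pvEnd (x : List Int) : Int := PySem.List.pyGetD x 1 0
def pvKey (x : List Int) : Lex (Int × Int) := toLex (pvStart x, -(pvEnd x))

-- ===== PORT A =====
-- A's loop body, verbatim: filter over the whole (sorted) list, then if / elif
def pvStepA (s : List (List Int)) (prev c : List Int)
    (st : List (List Int) × List (List Int)) : List (List Int) × List (List Int) :=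
  let find_emb := s.filter (fun x =>
    decide ((pvStart x ≤ pvStart c ∧ pvEnd x > pvEnd c) ∨ (pvStart x < pvStart c ∧ pvEnd x ≥ pvEnd c)))
  if find_emb ≠ [] then (st.1 ++ [c], st.2)
  else if pvStart c < pvEnd prev then (st.1, st.2 ++ [c])
  else st

def find_embeddings (indices : List (List Int)) : List (List (List Int)) :=
  let s := PySem.List.sorted indices pvKey
  let res := (PySem.List.pyRange 1 (PySem.List.len s) 1).foldl
    (fun st i => pvStepA s (PySem.List.pyGetD s (i - 1) []) (PySem.List.pyGetD s i []) st)
    ([], [])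
  [res.1, res.2]

-- ===== PORT B =====
-- B's loop body: state = (embedded, overlap, all_max, strict_max, group_start, prev_end)
def pvStepB (cur : List Int)
    (st : List (List Int) × List (List Int) × Int × Option Int × Int × Int) :
    List (List Int) × List (List Int) × Int × Option Int × Int × Int :=
  let (emb, ovl, allMax, strictMax, groupStart, prevEnd) := st
  let (strictMax, groupStart) :=
    if pvStart cur ≠ groupStart then (some allMax, pvStart cur) else (strictMax, groupStart)
  let cond : Bool := decide (allMax > pvEnd cur) ||
    (match strictMax with | some m => decide (m ≥ pvEnd cur) | none => false)
  let (emb, ovl) :=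
    if cond then (emb ++ [cur], ovl)
    else if pvStart cur < prevEnd then (emb, ovl ++ [cur])
    else (emb, ovl)
  let allMax := if pvEnd cur > allMax then pvEnd cur else allMax
  (emb, ovl, allMax, strictMax, groupStart, pvEnd cur)

def find_embeddings_alt (indices : List (List Int)) : List (List (List Int)) :=
  let s := PySem.List.sorted indices pvKey
  match s with
  | [] => [[], []]
  | h :: t =>
    let res := t.foldl (fun st cur => pvStepB cur st)
      ([], [], pvEnd h, none, pvStart h, pvEnd h)
    [res.1, res.2.1]

-- ===== PRECONDITION & SPEC =====
-- Pre_ excludes inputs containing an inner list of length < 2: there Python A raises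
-- IndexError (x[0] / x[1] in the sort key); B raises the same way.
def Pre_find_embeddings (indices : List (List Int)) : Prop :=
  ∀ l ∈ indices, 2 ≤ l.length
instance (indices : List (List Int)) : Decidable (Pre_find_embeddings indices) := by
  unfold Pre_find_embeddings; infer_instance
def pvWitness_find_embeddings : List (List Int) := [[0, 4], [1, 2], [3, 5]]

def Spec_find_embeddings (indices : List (List Int)) (out : List (List (List Int))) : Prop := out = find_embeddings_alt indices
instance (indices : List (List Int)) (out : List (List (List Int))) : Decidable (Spec_find_embeddings indices out) := by unfold Spec_find_embeddings; infer_instance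

-- ===== CLAIM (what is proved, stated in full; the proofs are below) =====
def Claim_equal_find_embeddings : Prop := ∀ (indices : List (List Int)), Dom_find_embeddings indices → Pre_find_embeddings indices → Spec_find_embeddings indices (find_embeddings indices)

-- ===== LEMMAS AND PROOFS =====

-- A's indexed loop, rephrased as a structural walk that carries the previous element
def pvWalkA (s : List (List Int)) : List Int → List (List Int) →
    List (List Int) × List (List Int) → List (List Int) × List (List Int)
  | _, [], st => st
  | prev, c :: r, st => pvWalkA s c r (pvStepA s prev c st)


theorem pvReshapeA (s : List (List Int)) :
    ∀ (rest pre : List (List Int)) (prev : List Int) (st : List (List Int) × List (List Int)),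
    s = pre ++ prev :: rest →
    (PySem.List.pyRange ((pre.length : Int) + 1) (PySem.List.len s) 1).foldl
      (fun st i => pvStepA s (PySem.List.pyGetD s (i - 1) []) (PySem.List.pyGetD s i []) st) st
    = pvWalkA s prev rest st := by
  intro rest
  induction rest with
  | nil =>
    intro pre prev st heq
    have hlen : PySem.List.len s = (pre.length : Int) + 1 := by
      simp [PySem.List.len_eq, heq]
    rw [hlen]
    simp [PySem.List.pyRange, pvWalkA]
  | cons c r ih =>
    intro pre prev st heq
    have hlen : PySem.List.len s = (s.length : Int) := by simp [PySem.List.len_eq]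
    have hlt : ((pre.length : Int) + 1) < PySem.List.len s := by
      rw [hlen, heq]; simp
    rw [PySem.List.pyRange_one_cons hlt]
    rw [List.foldl_cons]
    have hprev : PySem.List.pyGetD s ((pre.length : Int) + 1 - 1) [] = prev := by
      have : ((pre.length : Int) + 1 - 1) = (pre.length : Int) := by ring
      rw [this, PySem.List.pyGetD, heq, PySem.List.pyGet?_append_length]
      rfl
    have hc : PySem.List.pyGetD s ((pre.length : Int) + 1) [] = c := by
      have h1 : ((pre.length : Int) + 1) = ((pre.length : Int) + ((1 : Nat) : Int)) := by simp
      rw [PySem.List.pyGetD, heq, h1, PySem.List.pyGet?_append_right]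
      rfl
    rw [hprev, hc]
    have heq2 : s = (pre ++ [prev]) ++ c :: r := by simp [heq]
    have := ih (pre ++ [prev]) c (pvStepA s prev c st) heq2
    have hl : (((pre ++ [prev]).length : Int) + 1) = ((pre.length : Int) + 1 + 1) := by simp
    rw [hl] at this
    rw [this, pvWalkA]


theorem pvKey_le_iff (x y : List Int) :
    pvKey x ≤ pvKey y ↔ (pvStart x < pvStart y ∨ (pvStart x = pvStart y ∧ pvEnd y ≤ pvEnd x)) := by
  simp [pvKey, Prod.Lex.le_iff]


-- named invariants (avoid inline `match` in tactic goals)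
def pvSInv (l : List (List Int)) (p : List Int) (sm : Option Int) : Prop :=
  match sm with
  | none => ∀ x ∈ l, pvStart x = pvStart p
  | some m => (∀ x ∈ l, pvStart x < pvStart p → pvEnd x ≤ m) ∧
              (∃ x ∈ l, pvStart x < pvStart p ∧ pvEnd x = m)

def pvSInvC (l : List (List Int)) (c : List Int) (sm : Option Int) : Prop :=
  match sm with
  | none => ∀ x ∈ l, ¬ pvStart x < pvStart c
  | some m => (∀ x ∈ l, pvStart x < pvStart c → pvEnd x ≤ m) ∧
              (∃ x ∈ l, pvStart x < pvStart c ∧ pvEnd x = m)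


theorem pvCond_iff (s pre r : List (List Int)) (prev c : List Int)
    (heq : s = pre ++ prev :: c :: r)
    (hle2 : ∀ x ∈ pre ++ [prev], pvKey x ≤ pvKey c)
    (hr : ∀ x ∈ r, pvKey c ≤ pvKey x)
    (allMax : Int)
    (hub : ∀ x ∈ pre ++ [prev], pvEnd x ≤ allMax)
    (hat : ∃ x ∈ pre ++ [prev], pvEnd x = allMax)
    (strictMax' : Option Int)
    (hstrict : pvSInvC (pre ++ [prev]) c strictMax') :
    ((∃ x ∈ s, (pvStart x ≤ pvStart c ∧ pvEnd x > pvEnd c) ∨ (pvStart x < pvStart c ∧ pvEnd x ≥ pvEnd c))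
     ↔ (allMax > pvEnd c ∨ ∃ m, strictMax' = some m ∧ m ≥ pvEnd c)) := by
  constructor
  · rintro ⟨x, hx, hP⟩
    rw [heq] at hx
    simp only [List.mem_append, List.mem_cons] at hx
    have hx' : (x ∈ pre ++ [prev]) ∨ x = c ∨ x ∈ r := by
      simp only [List.mem_append, List.mem_cons]; tauto
    rcases hx' with hx' | rfl | hx'
    · by_cases hsx : pvStart x < pvStart c
      · have hxe : pvEnd c ≤ pvEnd x := by omega
        cases strictMax' with
        | none => exact absurd hsx (hstrict x hx')
        | some m =>
          exact Or.inr ⟨m, rfl, le_trans hxe (hstrict.1 x hx' hsx)⟩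
      · have := hub x hx'
        left; omega
    · omega
    · have := (pvKey_le_iff c x).mp (hr x hx')
      omega
  · rintro (hgt | ⟨m, hm, hmc⟩)
    · obtain ⟨x0, hx0, he0⟩ := hat
      have hk := (pvKey_le_iff x0 c).mp (hle2 x0 hx0)
      have hmem : x0 ∈ s := by
        rw [heq]
        simp only [List.mem_append, List.mem_cons]
        simp only [List.mem_append, List.mem_singleton] at hx0
        tauto
      exact ⟨x0, hmem, by omega⟩
    · rw [hm] at hstrict
      obtain ⟨x0, hx0, hlt, he0⟩ := hstrict.2
      have hmem : x0 ∈ s := by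
        rw [heq]
        simp only [List.mem_append, List.mem_cons]
        simp only [List.mem_append, List.mem_singleton] at hx0
        tauto
      exact ⟨x0, hmem, by omega⟩

theorem pvStepB_eq (s : List (List Int)) (prev c : List Int) (e o : List (List Int))
    (allMax : Int) (strictMax strictMax' : Option Int)
    (hsm : strictMax' = if pvStart c ≠ pvStart prev then some allMax else strictMax)
    (hiff : (List.filter (fun x =>
        decide ((pvStart x ≤ pvStart c ∧ pvEnd x > pvEnd c) ∨ (pvStart x < pvStart c ∧ pvEnd x ≥ pvEnd c))) s ≠ [])
      ↔ (allMax > pvEnd c ∨ ∃ m, strictMax' = some m ∧ m ≥ pvEnd c)) :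
    pvStepB c (e, o, allMax, strictMax, pvStart prev, pvEnd prev)
      = ((pvStepA s prev c (e, o)).1, (pvStepA s prev c (e, o)).2,
         (if pvEnd c > allMax then pvEnd c else allMax), strictMax', pvStart c, pvEnd c) := by
  by_cases hP : allMax > pvEnd c ∨ ∃ m, strictMax' = some m ∧ m ≥ pvEnd c
  · have hA : pvStepA s prev c (e, o) = (e ++ [c], o) := by
      simp only [pvStepA]
      rw [if_pos (hiff.mpr hP)]
    rw [hA]
    by_cases hgs : pvStart c = pvStart prev
    · have hsm2 : strictMax' = strictMax := by rw [hsm, if_neg (by simp [hgs])]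
      rw [hsm2] at hP
      cases strictMax with
      | none =>
        rcases hP with h1 | ⟨m, hm, _⟩
        · simp [pvStepB, hgs, hsm2, h1]
        · exact absurd hm (by simp)
      | some m =>
        rcases hP with h1 | ⟨m', hm, h2⟩
        · simp [pvStepB, hgs, hsm2, h1]
        · obtain rfl : m' = m := by injection hm.symm
          by_cases h1 : allMax > pvEnd c
          · simp [pvStepB, hgs, hsm2, h1]
          · simp [pvStepB, hgs, hsm2, h1, h2]
    · have hsm2 : strictMax' = some allMax := by rw [hsm, if_pos (by simp [hgs])]
      rw [hsm2] at hP
      have h2 : allMax ≥ pvEnd c := by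
        rcases hP with h1 | ⟨m', hm, h2⟩
        · omega
        · injection hm.symm with h; omega
      by_cases h1 : allMax > pvEnd c
      · simp [pvStepB, hgs, hsm2, h1]
      · simp [pvStepB, hgs, hsm2, h1, h2]
  · have hA : pvStepA s prev c (e, o)
        = if pvStart c < pvEnd prev then (e, o ++ [c]) else (e, o) := by
      simp only [pvStepA]
      rw [if_neg (by rw [hiff]; exact hP)]
    rw [hA]
    push Not at hP
    obtain ⟨h1, h2⟩ := hP
    by_cases hgs : pvStart c = pvStart prev
    · have hsm2 : strictMax' = strictMax := by rw [hsm, if_neg (by simp [hgs])]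
      rw [hsm2] at h2
      cases strictMax with
      | none => simp [pvStepB, hgs, hsm2, show ¬ pvEnd c < allMax by omega]
      | some m =>
        have h2' := h2 m rfl
        simp [pvStepB, hgs, hsm2, show ¬ pvEnd c < allMax by omega, show ¬ pvEnd c ≤ m by omega]
    · have hsm2 : strictMax' = some allMax := by rw [hsm, if_pos (by simp [hgs])]
      rw [hsm2] at h2
      have h2' := h2 allMax rfl
      simp [pvStepB, hgs, hsm2, show ¬ pvEnd c < allMax by omega, show ¬ pvEnd c ≤ allMax by omega]



theorem pvMain (s : List (List Int))
    (hp : List.Pairwise (fun a b => pvKey a ≤ pvKey b) s) :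
    ∀ (rest pre : List (List Int)) (prev : List Int) (e o : List (List Int))
      (allMax : Int) (strictMax : Option Int),
    s = pre ++ prev :: rest →
    (∀ x ∈ pre ++ [prev], pvEnd x ≤ allMax) →
    (∃ x ∈ pre ++ [prev], pvEnd x = allMax) →
    pvSInv (pre ++ [prev]) prev strictMax →
    pvWalkA s prev rest (e, o) =
      ((rest.foldl (fun st cur => pvStepB cur st) (e, o, allMax, strictMax, pvStart prev, pvEnd prev)).1,
       (rest.foldl (fun st cur => pvStepB cur st) (e, o, allMax, strictMax, pvStart prev, pvEnd prev)).2.1) := by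
  intro rest
  induction rest with
  | nil => intro pre prev e o allMax strictMax _ _ _ _; simp [pvWalkA]
  | cons c r ih =>
    intro pre prev e o allMax strictMax heq hub hat hstrict
    -- order facts from sortedness
    have hp' := hp
    rw [heq, List.pairwise_append, List.pairwise_cons] at hp'
    obtain ⟨-, ⟨hprevall, hp3⟩, hcross⟩ := hp'
    rw [List.pairwise_cons] at hp3
    obtain ⟨hcall, -⟩ := hp3
    have hle2 : ∀ x ∈ pre ++ [prev], pvKey x ≤ pvKey c := by
      intro x hx
      rcases List.mem_append.mp hx with h | h
      · exact hcross x h c (by simp)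
      · rw [List.mem_singleton] at h; subst h; exact hprevall c (by simp)
    have hprevc : pvKey prev ≤ pvKey c := hprevall c (by simp)
    -- the updated strict max and its invariant relative to c
    have hstrict' : pvSInvC (pre ++ [prev]) c
        (if pvStart c ≠ pvStart prev then some allMax else strictMax) := by
      by_cases hgs : pvStart c = pvStart prev
      · rw [if_neg (by simp [hgs])]
        cases strictMax with
        | none =>
          simp only [pvSInv] at hstrict
          simp only [pvSInvC]
          intro x hx
          have := hstrict x hx
          omega
        | some m =>
          simp only [pvSInv] at hstrict
          simp only [pvSInvC]
          refine ⟨fun x hx hlt => hstrict.1 x hx (by omega), ?_⟩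
          obtain ⟨x0, hx0, hlt0, he0⟩ := hstrict.2
          exact ⟨x0, hx0, by omega, he0⟩
      · rw [if_pos (by simp [hgs])]
        simp only [pvSInvC]
        have hplt : pvStart prev < pvStart c := by
          have := (pvKey_le_iff prev c).mp hprevc
          omega
        refine ⟨fun x hx _ => hub x hx, ?_⟩
        obtain ⟨x0, hx0, he0⟩ := hat
        have hx0lt : pvStart x0 < pvStart c := by
          rcases List.mem_append.mp hx0 with h | h
          · have := (pvKey_le_iff x0 prev).mp (hcross x0 h prev (by simp))
            omega
          · rw [List.mem_singleton] at h; subst h; omega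
        exact ⟨x0, hx0, hx0lt, he0⟩
    -- condition equivalence
    have hiff := pvCond_iff s pre r prev c heq hle2 hcall allMax hub hat _ hstrict'
    have hfil : (List.filter (fun x =>
        decide ((pvStart x ≤ pvStart c ∧ pvEnd x > pvEnd c) ∨ (pvStart x < pvStart c ∧ pvEnd x ≥ pvEnd c))) s ≠ [])
        ↔ (allMax > pvEnd c ∨ ∃ m,
            (if pvStart c ≠ pvStart prev then some allMax else strictMax) = some m ∧ m ≥ pvEnd c) := by
      rw [Ne, List.filter_eq_nil_iff]
      push Not
      simp only [decide_eq_true_eq]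
      exact hiff
    -- one step
    rw [List.foldl_cons, pvStepB_eq s prev c e o allMax strictMax _ rfl hfil]
    show pvWalkA s c r (pvStepA s prev c (e, o)) = _
    -- apply the IH at pre ++ [prev]
    have heq2 : s = (pre ++ [prev]) ++ c :: r := by simp [heq]
    have hub' : ∀ x ∈ (pre ++ [prev]) ++ [c], pvEnd x ≤ (if pvEnd c > allMax then pvEnd c else allMax) := by
      intro x hx
      rcases List.mem_append.mp hx with h | h
      · have := hub x h; split_ifs <;> omega
      · rw [List.mem_singleton] at h; subst h; split_ifs <;> omega
    have hat' : ∃ x ∈ (pre ++ [prev]) ++ [c], pvEnd x = (if pvEnd c > allMax then pvEnd c else allMax) := by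
      by_cases hcm : pvEnd c > allMax
      · exact ⟨c, by simp, by rw [if_pos hcm]⟩
      · obtain ⟨x0, hx0, he0⟩ := hat
        exact ⟨x0, List.mem_append.mpr (Or.inl hx0), by rw [if_neg hcm]; exact he0⟩
    have hstrict'' : pvSInv ((pre ++ [prev]) ++ [c]) c
        (if pvStart c ≠ pvStart prev then some allMax else strictMax) := by
      by_cases hgs : pvStart c = pvStart prev
      · rw [if_neg (by simp [hgs])]
        cases strictMax with
        | none =>
          simp only [pvSInv] at hstrict ⊢
          intro x hx
          rcases List.mem_append.mp hx with h | h
          · rw [hstrict x h, hgs]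
          · rw [List.mem_singleton] at h; subst h; rfl
        | some m =>
          rw [if_neg (by simp [hgs])] at hstrict'
          simp only [pvSInvC] at hstrict'
          simp only [pvSInv]
          refine ⟨fun x hx hlt => ?_, ?_⟩
          · rcases List.mem_append.mp hx with h | h
            · exact hstrict'.1 x h hlt
            · rw [List.mem_singleton] at h; subst h; omega
          · obtain ⟨x0, hx0, hlt0, he0⟩ := hstrict'.2
            exact ⟨x0, List.mem_append.mpr (Or.inl hx0), hlt0, he0⟩
      · rw [if_pos (by simp [hgs])]
        rw [if_pos (by simp [hgs])] at hstrict'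
        simp only [pvSInvC] at hstrict'
        simp only [pvSInv]
        refine ⟨fun x hx hlt => ?_, ?_⟩
        · rcases List.mem_append.mp hx with h | h
          · exact hstrict'.1 x h hlt
          · rw [List.mem_singleton] at h; subst h; omega
        · obtain ⟨x0, hx0, hlt0, he0⟩ := hstrict'.2
          exact ⟨x0, List.mem_append.mpr (Or.inl hx0), hlt0, he0⟩
    have := ih (pre ++ [prev]) c (pvStepA s prev c (e, o)).1 (pvStepA s prev c (e, o)).2
      (if pvEnd c > allMax then pvEnd c else allMax) _ heq2 hub' hat' hstrict''
    rw [← this]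


-- ===== VERDICT (by name: the statement is the Claim_ definition above) =====
theorem find_embeddings_spec : Claim_equal_find_embeddings := by
  intro indices _ _
  unfold Spec_find_embeddings find_embeddings find_embeddings_alt
  cases hs : PySem.List.sorted indices pvKey with
  | nil => simp [PySem.List.len, PySem.List.pyRange]
  | cons h t =>
    have hp := PySem.List.sorted_pairwise indices pvKey
    rw [hs] at hp
    have h1 : ((([] : List (List Int)).length : Int) + 1) = (1 : Int) := by simp
    have hre := pvReshapeA (h :: t) t [] h ([], []) rfl
    rw [h1] at hre
    simp only [hre]
    rw [pvMain (h :: t) hp t [] h [] [] (pvEnd h) none rfl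
      (by intro x hx; simp at hx; subst hx; exact le_refl _)
      ⟨h, by simp⟩
      (by simp only [pvSInv]; intro x hx; simp at hx; subst hx; rfl)]
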